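-- pv_equiv track=rewrite | github.com/saehoon861/JamJamBeat | model/model_evaluation/모델별영상체크/dataset_variant_runtime.py | _single_variant
-- ===== SOURCE A (Python) =====
-- DATASET_VARIANTS = ("baseline", "pos_only", "scale_only", "pos_scale")
--
-- def _single_variant(candidates: list[str]) -> str | None:
--     cleaned = [candidate for candidate in candidates if candidate in DATASET_VARIANTS]
--     if not cleaned:
--         return None
--     unique = set(cleaned)
--     if len(unique) == 1:
--         return cleaned[0]
--     return None
-- ===== SOURCE B (Python) =====
-- DATASET_VARIANTS = ("baseline", "pos_only", "scale_only", "pos_scale")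
--
-- def _single_variant(candidates: list[str]) -> str | None:
--     found = None
--     for candidate in candidates:
--         if candidate not in DATASET_VARIANTS:
--             continue
--         if found is None:
--             found = candidate
--         elif candidate != found:
--             return None
--     return found
-- ===== Notes on version B (the rewrite author's own statement) =====
-- stated objective: simpler
-- what changed: Replaces the filter-list + set + unique-count check with a single early-exit pass that keeps only the first valid variant and bails out on the first conflicting one.
import Mathlib
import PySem

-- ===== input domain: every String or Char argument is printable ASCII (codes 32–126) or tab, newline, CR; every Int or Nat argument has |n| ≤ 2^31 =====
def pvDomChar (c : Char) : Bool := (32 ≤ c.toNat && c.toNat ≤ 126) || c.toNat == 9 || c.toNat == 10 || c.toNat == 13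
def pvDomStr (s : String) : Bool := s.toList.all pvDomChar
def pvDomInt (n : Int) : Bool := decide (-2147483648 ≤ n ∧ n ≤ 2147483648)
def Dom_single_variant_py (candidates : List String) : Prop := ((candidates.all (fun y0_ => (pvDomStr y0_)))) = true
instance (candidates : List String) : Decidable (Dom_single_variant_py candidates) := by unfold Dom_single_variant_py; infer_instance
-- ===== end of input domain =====

-- B replaces A's filter-list + set + unique-count check by a single early-exit pass keeping
-- only the first valid variant (objective: simpler).

-- ===== PORT A =====
def pvVariants : List String := ["baseline", "pos_only", "scale_only", "pos_scale"]

def single_variant_py (candidates : List String) : Option String :=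
  let cleaned := candidates.filter (fun c => pvVariants.contains c)
  if cleaned.isEmpty then none
  else
    let unique : PySem.Set String := PySem.Set.ofList cleaned
    if PySem.Set.len unique = 1 then some (cleaned.headD "")  -- cleaned[0]; cleaned nonempty here
    else none

-- ===== PORT B =====
def svLoop : List String → Option String → Option String
  | [], found => found
  | c :: rest, found =>
    if pvVariants.contains c then
      match found with
      | none => svLoop rest (some c)
      | some f => if c ≠ f then none else svLoop rest (some f)
    else svLoop rest found

def single_variant_py_alt (candidates : List String) : Option String :=
  svLoop candidates none

-- ===== PRECONDITION & SPEC =====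
def Spec_single_variant_py (candidates : List String) (out : Option String) : Prop := out = single_variant_py_alt candidates
instance (candidates : List String) (out : Option String) : Decidable (Spec_single_variant_py candidates out) := by unfold Spec_single_variant_py; infer_instance

-- ===== CLAIM (what is proved, stated in full; the proofs are below) =====
def Claim_equal_single_variant_py : Prop := ∀ (candidates : List String), Dom_single_variant_py candidates → Spec_single_variant_py candidates (single_variant_py candidates)

-- ===== LEMMAS AND PROOFS =====

-- the loop carrying a found value returns it iff every later valid candidate equals it
theorem svLoop_some (xs : List String) (f : String) :
    svLoop xs (some f) =
      if (xs.filter (fun c => pvVariants.contains c)).all (· == f) then some f else none := by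
  induction xs with
  | nil => simp [svLoop]
  | cons c rest ih =>
    by_cases hv : pvVariants.contains c = true
    · have hv' : c ∈ pvVariants := by simpa using hv
      by_cases hcf : c = f
      · subst hcf
        simp [svLoop, hv', ih, List.contains_eq_mem]
      · simp [svLoop, hv', hcf, List.contains_eq_mem]
    · have hv' : c ∉ pvVariants := by simpa using hv
      simp [svLoop, hv', ih, List.contains_eq_mem]

theorem discard_eq_nil_iff (s : List String) (c : String) :
    PySem.Set.discard s c = [] ↔ ∀ x ∈ s, x = c := by
  constructor
  · intro h x hx
    by_contra hne
    have : x ∈ PySem.Set.discard s c := (PySem.Set.mem_discard _ _ _).2 ⟨hx, hne⟩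
    simp [h] at this
  · intro h
    rw [List.eq_nil_iff_forall_not_mem]
    intro x hx
    rcases (PySem.Set.mem_discard _ _ _).1 hx with ⟨hxs, hne⟩
    exact hne (h x hxs)

theorem ofList_cons_len_one (c : String) (L : List String) :
    (PySem.Set.ofList (c :: L)).length = 1 ↔ ∀ x ∈ L, x = c := by
  rw [PySem.Set.ofList_cons, List.length_cons]
  have h0 : ((PySem.Set.ofList L).discard c).length + 1 = 1 ↔
      ((PySem.Set.ofList L).discard c).length = 0 := by omega
  rw [h0, List.length_eq_zero_iff, discard_eq_nil_iff]
  simp [PySem.Set.mem_ofList]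

theorem ab_eq (xs : List String) : single_variant_py xs = single_variant_py_alt xs := by
  unfold single_variant_py single_variant_py_alt
  induction xs with
  | nil => simp [svLoop]
  | cons c rest ih =>
    by_cases hv : pvVariants.contains c = true
    · simp only [List.filter_cons, hv, if_true, List.isEmpty_cons, Bool.false_eq_true, if_false,
        svLoop, svLoop_some, List.headD_cons, PySem.Set.len, Nat.cast_eq_one]
      by_cases hall : ∀ x ∈ rest.filter (fun c => pvVariants.contains c), x = c
      · rw [if_pos ((ofList_cons_len_one c _).2 hall),
            if_pos (List.all_eq_true.mpr (fun x hx => by simpa using hall x hx))]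
      · rw [if_neg (fun h => hall ((ofList_cons_len_one c _).1 h)),
            if_neg (fun h => hall (fun x hx => by simpa using List.all_eq_true.mp h x hx))]
    · simp only [List.filter_cons, hv, Bool.false_eq_true, if_false, svLoop]
      exact ih

-- ===== VERDICT (by name: the statement is the Claim_ definition above) =====
theorem single_variant_py_spec : Claim_equal_single_variant_py := by
  intro candidates _
  exact ab_eq candidates
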